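-- pv_equiv track=rewrite | github.com/primrose101/CS322 | finite_state_machines/keywords.py | kwstop_fsm
-- ===== SOURCE A (Python) =====
-- def kwstop_fsm(string_input, index):
--     i = index
--
--     table = [
--         [1, 5, 5, 5, 5],
--         [5, 2, 5, 5, 5],
--         [5, 5, 3, 5, 5],
--         [5, 5, 5, 4, 5],
--         [5, 5, 5, 5, 5],
--         [5, 5, 5, 5, 5],
--     ]
--
--     state = 0
--     inputstate = 0
--
--     string_length = len(string_input)
--
--     while i != string_length:
--         if string_input[i] == 'S':
--             inputstate = 0
--         elif string_input[i] == 'T':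
--             inputstate = 1
--         elif string_input[i] == 'O':
--             inputstate = 2
--         elif string_input[i] == 'P':
--             inputstate = 3
--         else:
--             inputstate = 4
--
--         state = table[state][inputstate]
--
--         if state == 5:
--             break
--
--         i += 1
--
--     return i - index
-- ===== SOURCE B (Python) =====
-- def kwstop_fsm(string_input, index):
--     # Direct comparison against the literal "STOP": no transition table, no DFA
--     # state -- only the running match count k is maintained.
--     for k, c in enumerate("STOP"):
--         i = index + k
--         if i == len(string_input) or string_input[i] != c:
--             return k
--     return 4
-- ===== Notes on version B (the rewrite author's own statement) =====
-- stated objective: simpler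
-- what changed: Replaces the 6x5 transition table and maintained DFA state/inputstate classification by a direct character-by-character comparison against the literal "STOP", keeping only the running match count k.
import Mathlib
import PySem

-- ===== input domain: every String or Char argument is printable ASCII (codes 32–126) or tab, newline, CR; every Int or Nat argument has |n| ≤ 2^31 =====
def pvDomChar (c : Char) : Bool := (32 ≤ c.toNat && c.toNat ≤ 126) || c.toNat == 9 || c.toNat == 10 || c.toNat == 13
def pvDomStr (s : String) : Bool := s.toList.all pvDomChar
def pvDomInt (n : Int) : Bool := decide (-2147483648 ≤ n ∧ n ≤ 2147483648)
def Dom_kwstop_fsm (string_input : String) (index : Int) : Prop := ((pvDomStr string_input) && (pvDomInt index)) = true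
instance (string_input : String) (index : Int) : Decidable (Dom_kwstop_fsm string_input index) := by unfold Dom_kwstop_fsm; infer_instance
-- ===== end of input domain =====

-- B replaces A's 6x5 transition table and maintained DFA state/inputstate
-- classification by a direct character comparison against the literal "STOP",
-- keeping only the running match count (objective: simpler).

-- ===== PORT A =====
def kwTable : List (List Int) :=
  [ [1, 5, 5, 5, 5],
    [5, 2, 5, 5, 5],
    [5, 5, 3, 5, 5],
    [5, 5, 5, 4, 5],
    [5, 5, 5, 5, 5],
    [5, 5, 5, 5, 5] ]

-- A's transition table lookup table[state][inputstate], Python indexing (raises are impossible here: state ∈ 0..5, inputstate ∈ 0..4)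
def kwNext (state inputstate : Int) : Int :=
  (PySem.List.pyGet? ((PySem.List.pyGet? kwTable state).getD []) inputstate).getD 5

def kwClass (c : Char) : Int :=
  if c = 'S' then 0
  else if c = 'T' then 1
  else if c = 'O' then 2
  else if c = 'P' then 3
  else 4

-- A's while loop, step for step.  Fuel 6 is exact: the DFA state strictly
-- ascends 0,1,2,3,4 and every character at state 4 yields 5 (break), so the
-- Python loop body runs at most 5 times.
def kwLoopA (cs : List Char) (n : Int) (state : Int) (i : Int) : Nat → Int
  | 0 => i
  | fuel + 1 =>
    if i = n then i
    else
      -- none = Python IndexError (outside Pre_): return current i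
      (PySem.List.pyGet? cs i).elim i (fun c =>
        let inputstate := kwClass c
        let state' := kwNext state inputstate
        if state' = 5 then i
        else kwLoopA cs n state' (i + 1) fuel)

-- B's loop: compare against "STOP" character by character; k is the match count.

def kwstop_fsm (string_input : String) (index : Int) : Int :=
  let cs := string_input.toList
  kwLoopA cs (cs.length : Int) 0 index 6 - index

-- ===== PORT B =====
-- B's loop: compare against "STOP" character by character; k is the match count.
def kwLoopB (cs : List Char) (index : Int) (k : Int) : List Char → Int
  | [] => k
  | c :: rest =>
    let i := index + k
    if i = (cs.length : Int) ∨ PySem.List.pyGet? cs i ≠ some c then k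
    else kwLoopB cs index (k + 1) rest

def kwstop_fsm_alt (string_input : String) (index : Int) : Int :=
  kwLoopB string_input.toList index 0 "STOP".toList

-- ===== PRECONDITION & SPEC =====
-- Pre_ excludes exactly the inputs on which the Python A raises IndexError:
-- index > len(string_input) or index < -len(string_input).  (Negative indices
-- down to -len are INSIDE Pre_: Python reads them with wraparound and both
-- programs behave identically there.)
def Pre_kwstop_fsm (string_input : String) (index : Int) : Prop :=
  -(string_input.toList.length : Int) ≤ index ∧ index ≤ (string_input.toList.length : Int)
instance (string_input : String) (index : Int) : Decidable (Pre_kwstop_fsm string_input index) := by unfold Pre_kwstop_fsm; infer_instance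

def pvWitness_kwstop_fsm : String × Int := ("xSTOPy", 1)

def Spec_kwstop_fsm (string_input : String) (index : Int) (out : Int) : Prop := out = kwstop_fsm_alt string_input index
instance (string_input : String) (index : Int) (out : Int) : Decidable (Spec_kwstop_fsm string_input index out) := by unfold Spec_kwstop_fsm; infer_instance

-- ===== CLAIM (what is proved, stated in full; the proofs are below) =====
def Claim_equal_kwstop_fsm : Prop := ∀ (string_input : String) (index : Int), Dom_kwstop_fsm string_input index → Pre_kwstop_fsm string_input index → Spec_kwstop_fsm string_input index (kwstop_fsm string_input index)

-- ===== LEMMAS AND PROOFS =====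

theorem kwGet (cs : List Char) (i : Int) (h1 : -(cs.length:Int) ≤ i) (h2 : i < (cs.length:Int)) :
    ∃ c, PySem.List.pyGet? cs i = some c := by
  cases h : PySem.List.pyGet? cs i with
  | none =>
    rw [PySem.List.pyGet?_eq_none_iff] at h
    exact absurd (by simp [PySem.Raise.InRange]; omega) h
  | some c => exact ⟨c, rfl⟩

theorem kwLoopA_succ (cs : List Char) (n state i : Int) (fuel : Nat) :
    kwLoopA cs n state i (fuel + 1) =
      (if i = n then i
       else
        (PySem.List.pyGet? cs i).elim i (fun c =>
          let inputstate := kwClass c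
          let state' := kwNext state inputstate
          if state' = 5 then i
          else kwLoopA cs n state' (i + 1) fuel)) := rfl

theorem kwNext_break (st : Int) (c : Char)
    (hst : st = 0 ∧ c ≠ 'S' ∨ st = 1 ∧ c ≠ 'T' ∨ st = 2 ∧ c ≠ 'O' ∨ st = 3 ∧ c ≠ 'P' ∨ st = 4) :
    kwNext st (kwClass c) = 5 := by
  unfold kwClass
  rcases hst with ⟨h, hc⟩ | ⟨h, hc⟩ | ⟨h, hc⟩ | ⟨h, hc⟩ | h <;> subst h <;>
    split_ifs <;> first | decide | exact absurd (by assumption) hc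

theorem kwstop_fsm_main (cs : List Char) (index : Int)
    (h1 : -(cs.length : Int) ≤ index) (h2 : index ≤ (cs.length : Int)) :
    kwLoopA cs (cs.length : Int) 0 index 6 - index = kwLoopB cs index 0 "STOP".toList := by
  have hstop : "STOP".toList = ['S','T','O','P'] := by decide
  rw [hstop]
  rw [show (6:Nat) = 5+1 from rfl, kwLoopA_succ]
  by_cases h0 : index = (cs.length : Int)
  · simp [kwLoopB, h0]
  · obtain ⟨c0, hc0⟩ := kwGet cs index h1 (lt_of_le_of_ne h2 h0)
    rw [if_neg h0, hc0]
    simp only [Option.elim]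
    by_cases e0 : c0 = 'S'
    case neg =>
      rw [kwNext_break 0 c0 (Or.inl ⟨rfl, e0⟩)]
      simp [kwLoopB, hc0, e0]
    case pos =>
      subst e0
      rw [show kwNext 0 (kwClass 'S') = 1 from by decide, if_neg (by decide)]
      rw [show kwLoopB cs index 0 ['S','T','O','P'] = kwLoopB cs index 1 ['T','O','P'] from by
        simp [kwLoopB, hc0, h0]]
      have hlt0 : index < (cs.length : Int) := lt_of_le_of_ne h2 h0
      -- level 1: expect 'T'
      rw [show (5:Nat) = 4+1 from rfl, kwLoopA_succ]
      by_cases g1 : index + 1 = (cs.length : Int)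
      · rw [if_pos g1]
        rw [show kwLoopB cs index 1 ['T','O','P'] = 1 from by simp [kwLoopB, g1]]
        omega
      · rw [if_neg g1]
        have hlt1 : index + 1 < (cs.length : Int) := by omega
        obtain ⟨c1, hc1⟩ := kwGet cs (index+1) (by omega) hlt1
        rw [hc1]; simp only [Option.elim]
        by_cases e1 : c1 = 'T'
        case neg =>
          rw [kwNext_break 1 c1 (by tauto), if_pos rfl]
          rw [show kwLoopB cs index 1 ['T','O','P'] = 1 from by simp [kwLoopB, hc1, e1]]
          omega
        case pos =>
          subst e1
          rw [show kwNext 1 (kwClass 'T') = 2 from by decide, if_neg (by decide)]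
          rw [show kwLoopB cs index 1 ['T','O','P'] = kwLoopB cs index 2 ['O','P'] from by
            simp [kwLoopB, hc1, g1]]
          -- level 2: expect 'O'
          rw [show (4:Nat) = 3+1 from rfl, kwLoopA_succ]
          by_cases g2 : index + 1 + 1 = (cs.length : Int)
          · rw [if_pos g2]
            rw [show kwLoopB cs index 2 ['O','P'] = 2 from by
              simp [kwLoopB, show index + 2 = (cs.length : Int) from by omega]]
            omega
          · rw [if_neg g2]
            have hlt2 : index + 2 < (cs.length : Int) := by omega
            obtain ⟨c2, hc2⟩ := kwGet cs (index+2) (by omega) hlt2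
            rw [show index + 1 + 1 = index + 2 from by ring, hc2]; simp only [Option.elim]
            by_cases e2 : c2 = 'O'
            case neg =>
              rw [kwNext_break 2 c2 (by tauto), if_pos rfl]
              rw [show kwLoopB cs index 2 ['O','P'] = 2 from by simp [kwLoopB, hc2, e2]]
              omega
            case pos =>
              subst e2
              rw [show kwNext 2 (kwClass 'O') = 3 from by decide, if_neg (by decide)]
              rw [show kwLoopB cs index 2 ['O','P'] = kwLoopB cs index 3 ['P'] from by
                simp [kwLoopB, hc2, show ¬ (index + 2 = (cs.length:Int)) from by omega]]
              -- level 3: expect 'P'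
              rw [show (3:Nat) = 2+1 from rfl, kwLoopA_succ]
              by_cases g3 : index + 2 + 1 = (cs.length : Int)
              · rw [if_pos g3]
                rw [show kwLoopB cs index 3 ['P'] = 3 from by
                  simp [kwLoopB, show index + 3 = (cs.length : Int) from by omega]]
                omega
              · rw [if_neg g3]
                have hlt3 : index + 3 < (cs.length : Int) := by omega
                obtain ⟨c3, hc3⟩ := kwGet cs (index+3) (by omega) hlt3
                rw [show index + 2 + 1 = index + 3 from by ring, hc3]; simp only [Option.elim]
                by_cases e3 : c3 = 'P'
                case neg =>
                  rw [kwNext_break 3 c3 (by tauto), if_pos rfl]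
                  rw [show kwLoopB cs index 3 ['P'] = 3 from by simp [kwLoopB, hc3, e3]]
                  omega
                case pos =>
                  subst e3
                  rw [show kwNext 3 (kwClass 'P') = 4 from by decide, if_neg (by decide)]
                  rw [show kwLoopB cs index 3 ['P'] = kwLoopB cs index 4 [] from by
                    simp [kwLoopB, hc3, show ¬ (index + 3 = (cs.length:Int)) from by omega]]
                  rw [show kwLoopB cs index 4 [] = 4 from rfl]
                  -- level 4: state 4, any char breaks
                  rw [show (2:Nat) = 1+1 from rfl, kwLoopA_succ]
                  by_cases g4 : index + 3 + 1 = (cs.length : Int)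
                  · rw [if_pos g4]; omega
                  · rw [if_neg g4]
                    obtain ⟨c4, hc4⟩ := kwGet cs (index+3+1) (by omega) (by omega)
                    rw [hc4]; simp only [Option.elim]
                    rw [kwNext_break 4 c4 (by tauto), if_pos rfl]
                    omega

-- ===== VERDICT (by name: the statement is the Claim_ definition above) =====
theorem kwstop_fsm_spec : Claim_equal_kwstop_fsm := by
  intro s index _ hpre
  unfold Spec_kwstop_fsm kwstop_fsm kwstop_fsm_alt
  exact kwstop_fsm_main s.toList index hpre.1 hpre.2
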